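-- pv_equiv track=rewrite | github.com/kjughx/AoC24 | src/day12.py | count_between_corners
-- ===== SOURCE A (Python) =====
-- def count_between_corners(grid, region):
--     # Create a set for fast lookup
--     region_set = set(region)
--     corners = set()  # To store unique corner positions
--
--     for r, c in region:
--         # Check four corners around the cell
--         potential_corners = [
--             (r, c),         # Top-left
--             (r, c + 1),     # Top-right
--             (r + 1, c),     # Bottom-left
--             (r + 1, c + 1)  # Bottom-right
--         ]
--
--         for corner in potential_corners:
--             # Check if the corner has a mix of inside and outside neighbors
--             x, y = corner
--             adjacent_cells = [
--                 (x - 1, y - 1), (x - 1, y),  # Top-left, Top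
--                 (x, y - 1),     (x, y)       # Left, Center
--             ]
--             # Count neighbors inside the region
--             inside_count = sum(
--                 (nx, ny) in region_set for nx, ny in adjacent_cells
--             )
--             # A valid corner has at least one inside and one outside neighbor
--             if 0 < inside_count < len(adjacent_cells):
--                 corners.add(corner)
--
--     return len(corners)
-- ===== SOURCE B (Python) =====
-- def count_between_corners(grid, region):
--     # Accumulate, per corner vertex, how many distinct region cells touch it;
--     # a vertex is a "between" corner iff its tally is strictly between 0 and 4.
--     counts = {}
--     for r, c in set(region):
--         for v in ((r, c), (r, c + 1), (r + 1, c), (r + 1, c + 1)):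
--             counts[v] = counts.get(v, 0) + 1
--     return sum(1 for n in counts.values() if 0 < n < 4)
-- ===== Notes on version B (the rewrite author's own statement) =====
-- stated objective: simpler
-- what changed: Replaces A's per-cell 2x2 membership lookups and corner-set accumulation with one accumulation pass: a counter over the corner vertices of the distinct region cells, returning the number of vertices whose tally is strictly between 0 and 4.
import Mathlib
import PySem

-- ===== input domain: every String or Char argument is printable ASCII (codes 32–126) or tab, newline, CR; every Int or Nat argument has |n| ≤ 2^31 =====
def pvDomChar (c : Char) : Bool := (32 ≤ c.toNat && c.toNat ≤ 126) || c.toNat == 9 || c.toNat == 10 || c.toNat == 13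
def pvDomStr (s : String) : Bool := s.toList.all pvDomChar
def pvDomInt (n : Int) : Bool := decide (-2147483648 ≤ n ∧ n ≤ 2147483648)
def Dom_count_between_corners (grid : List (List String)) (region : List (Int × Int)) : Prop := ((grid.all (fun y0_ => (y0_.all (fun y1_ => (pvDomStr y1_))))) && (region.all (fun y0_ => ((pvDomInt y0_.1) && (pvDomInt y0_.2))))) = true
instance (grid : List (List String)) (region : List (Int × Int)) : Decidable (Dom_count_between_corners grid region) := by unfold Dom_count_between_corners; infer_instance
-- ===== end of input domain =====

-- B replaces A's per-corner 2x2 membership lookups and corner-set accumulation by a single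
-- counter over the corner vertices of the distinct region cells (objective: simpler).

-- ===== PORT A =====
-- the four corner vertices of a cell (the list A builds as `potential_corners`)
def pvCorners4 (rc : Int × Int) : List (Int × Int) :=
  [(rc.1, rc.2), (rc.1, rc.2 + 1), (rc.1 + 1, rc.2), (rc.1 + 1, rc.2 + 1)]

-- the four cells adjacent to a vertex (the list A builds as `adjacent_cells`)
def pvAdj4 (v : Int × Int) : List (Int × Int) :=
  [(v.1 - 1, v.2 - 1), (v.1 - 1, v.2), (v.1, v.2 - 1), (v.1, v.2)]

-- A's `inside_count`: sum of booleans `(nx, ny) in region_set`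
def pvInside (region_set : PySem.Set (Int × Int)) (v : Int × Int) : Int :=
  ((pvAdj4 v).map (fun p => if PySem.Set.contains region_set p then (1 : Int) else 0)).sum

def count_between_corners (grid : List (List String)) (region : List (Int × Int)) : Int :=
  let region_set := PySem.Set.ofList region
  let corners := region.foldl (fun corners rc =>
    (pvCorners4 rc).foldl (fun corners corner =>
      let inside_count := pvInside region_set corner
      if 0 < inside_count ∧ inside_count < ((pvAdj4 corner).length : Int)
      then PySem.Set.add corners corner else corners) corners)
    PySem.Set.empty
  PySem.Set.len corners

-- ===== PORT B =====
def count_between_corners_alt (grid : List (List String)) (region : List (Int × Int)) : Int :=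
  let counts := (PySem.Set.ofList region).foldl (fun d rc =>
      (pvCorners4 rc).foldl (fun d v => d.insert v (d.getD v 0 + 1)) d)
    (PySem.Dict.empty : PySem.Dict (Int × Int) Int)
  counts.values.foldl (fun acc n => if 0 < n ∧ n < 4 then acc + 1 else acc) 0

-- ===== PRECONDITION & SPEC =====
def Spec_count_between_corners (grid : List (List String)) (region : List (Int × Int)) (out : Int) : Prop := out = count_between_corners_alt grid region
instance (grid : List (List String)) (region : List (Int × Int)) (out : Int) : Decidable (Spec_count_between_corners grid region out) := by unfold Spec_count_between_corners; infer_instance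

-- ===== CLAIM (what is proved, stated in full; the proofs are below) =====
def Claim_equal_count_between_corners : Prop := ∀ (grid : List (List String)) (region : List (Int × Int)), Dom_count_between_corners grid region → Spec_count_between_corners grid region (count_between_corners grid region)

-- ===== LEMMAS AND PROOFS =====

-- a vertex is a corner of a cell iff the cell is adjacent to the vertex
lemma mem_corners4_iff_mem_adj4 (v c : Int × Int) :
    v ∈ pvCorners4 c ↔ c ∈ pvAdj4 v := by
  simp [pvCorners4, pvAdj4, Prod.ext_iff]
  omega

lemma nodup_corners4 (c : Int × Int) : (pvCorners4 c).Nodup := by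
  simp [pvCorners4, Prod.ext_iff]

lemma nodup_adj4 (v : Int × Int) : (pvAdj4 v).Nodup := by
  simp [pvAdj4, Prod.ext_iff]

-- symmetric intersection count of two duplicate-free lists
lemma countP_mem_swap (l m : List (Int × Int)) (hl : l.Nodup) (hm : m.Nodup) :
    l.countP (fun a => decide (a ∈ m)) = m.countP (fun a => decide (a ∈ l)) := by
  have h : (l.filter (fun a => decide (a ∈ m))).Perm (m.filter (fun a => decide (a ∈ l))) := by
    rw [List.perm_ext_iff_of_nodup (hl.filter _) (hm.filter _)]
    intro a
    simp [List.mem_filter, and_comm]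
  simpa [List.countP_eq_length_filter] using h.length_eq
-- ---- A side: membership and nodup of the accumulated corner set ----

lemma foldl_add_if_mem {p : (Int × Int) → Prop} [DecidablePred p]
    (cs : List (Int × Int)) (acc : PySem.Set (Int × Int)) (v : Int × Int) :
    v ∈ cs.foldl (fun s k => if p k then PySem.Set.add s k else s) acc ↔
      v ∈ acc ∨ (v ∈ cs ∧ p v) := by
  induction cs generalizing acc with
  | nil => simp
  | cons k cs ih =>
    simp only [List.foldl_cons, ih]
    by_cases hk : p k
    · simp only [if_pos hk, PySem.Set.mem_add, List.mem_cons]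
      constructor
      · rintro (⟨h | rfl⟩ | h) <;> tauto
      · rintro (h | ⟨(rfl | h), hp⟩) <;> tauto
    · simp only [if_neg hk, List.mem_cons]
      constructor
      · rintro (h | h) <;> tauto
      · rintro (h | ⟨(rfl | h), hp⟩) <;> tauto

lemma foldl_add_if_nodup {p : (Int × Int) → Prop} [DecidablePred p]
    (cs : List (Int × Int)) (acc : PySem.Set (Int × Int)) (h : acc.Nodup) :
    (cs.foldl (fun s k => if p k then PySem.Set.add s k else s) acc).Nodup := by
  induction cs generalizing acc with
  | nil => exact h
  | cons k cs ih =>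
    simp only [List.foldl_cons]
    split_ifs with hk
    · exact ih _ (PySem.Set.nodup_add acc k h)
    · exact ih _ h

-- ---- B side ----

-- the nested fold over cells and their corners is the fold over the flattened corner list
lemma foldl_flat {β : Type} (g : β → (Int × Int) → β) (L : List (Int × Int)) (d : β) :
    L.foldl (fun d c => (pvCorners4 c).foldl g d) d = (L.flatMap pvCorners4).foldl g d := by
  induction L generalizing d with
  | nil => rfl
  | cons c L ih => simp [List.flatMap_cons, List.foldl_append, ih]

-- the counter's tally at v equals A's inside count at v
lemma count_flat_eq_inside (region : List (Int × Int)) (v : Int × Int) :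
    (List.count v ((PySem.Set.ofList region).flatMap pvCorners4) : Int)
      = pvInside (PySem.Set.ofList region) v := by
  have hstep : ∀ c : Int × Int, List.count v (pvCorners4 c)
      = if (decide (c ∈ pvAdj4 v)) = true then 1 else 0 := by
    intro c
    by_cases hc : v ∈ pvCorners4 c
    · rw [List.count_eq_one_of_mem (nodup_corners4 c) hc]
      simp [(mem_corners4_iff_mem_adj4 v c).mp hc]
    · rw [List.count_eq_zero_of_not_mem hc]
      have : c ∉ pvAdj4 v := fun h => hc ((mem_corners4_iff_mem_adj4 v c).mpr h)
      simp [this]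
  rw [List.count_flatMap, Nat.cast_list_sum, List.map_map]
  have hmap : ((PySem.Set.ofList region).map (Nat.cast ∘ (List.count v ∘ pvCorners4))).sum
      = ((PySem.Set.ofList region).map
          (fun c => if (decide (c ∈ pvAdj4 v)) = true then (1 : Int) else 0)).sum := by
    congr 1
    refine List.map_congr_left (fun c _ => ?_)
    simp only [Function.comp_apply, hstep c]
    split_ifs <;> simp
  rw [hmap, PySem.List.sum_map_ite_one_zero,
    countP_mem_swap _ _ (PySem.Set.nodup_ofList region) (nodup_adj4 v)]
  simp only [pvInside]
  rw [PySem.List.sum_map_ite_one_zero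
    (fun p => PySem.Set.contains (PySem.Set.ofList region) p)]
  congr 1
  exact List.countP_congr fun p _ => by simp

-- ---- main ----

lemma spec_main (grid : List (List String)) (region : List (Int × Int)) :
    Spec_count_between_corners grid region (count_between_corners grid region) := by
  unfold Spec_count_between_corners count_between_corners count_between_corners_alt
  dsimp only
  -- B: the nested fold is a counter over the flattened corner list
  simp only [foldl_flat]
  simp only [PySem.Dict.foldl_insert_getD_add_one_eq_counter]
  have hitefun : (fun (acc : Int) (n : Int) => if 0 < n ∧ n < 4 then acc + 1 else acc)
      = fun acc n => if (fun n : Int => decide (0 < n ∧ n < 4)) n = true then acc + 1 else acc := by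
    funext acc n; by_cases h : 0 < n ∧ n < 4 <;> simp [h]
  simp only [PySem.Dict.values, PySem.Dict.items_counter, List.map_map]
  rw [hitefun, PySem.List.foldl_count_if, List.countP_map]
  simp only [PySem.Set.len, zero_add]
  -- the selection predicate, through the counter's tally = inside count
  rw [List.countP_congr
    (q := fun k => decide (0 < pvInside (PySem.Set.ofList region) k ∧
      pvInside (PySem.Set.ofList region) k < 4))
    (fun k _ => by
      simp only [Function.comp_apply, count_flat_eq_inside region k]),
    List.countP_eq_length_filter]
  -- both sides are lengths of duplicate-free lists with the same members
  have hperm : (List.foldl (fun corners corner =>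
        if 0 < pvInside (PySem.Set.ofList region) corner ∧
            pvInside (PySem.Set.ofList region) corner < ((pvAdj4 corner).length : Int)
        then PySem.Set.add corners corner else corners)
      PySem.Set.empty (region.flatMap pvCorners4)).Perm
      (List.filter (fun k => decide (0 < pvInside (PySem.Set.ofList region) k ∧
          pvInside (PySem.Set.ofList region) k < 4))
        (PySem.Set.ofList ((PySem.Set.ofList region).flatMap pvCorners4))) := by
    rw [List.perm_ext_iff_of_nodup
      (foldl_add_if_nodup _ _ (by simp [PySem.Set.empty]))
      (List.Nodup.filter _ (PySem.Set.nodup_ofList _))]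
    intro v
    rw [foldl_add_if_mem (p := fun k => 0 < pvInside (PySem.Set.ofList region) k ∧
        pvInside (PySem.Set.ofList region) k < ((pvAdj4 k).length : Int)),
      List.mem_filter]
    have hadj : (((pvAdj4 v).length : Nat) : Int) = 4 := by simp [pvAdj4]
    simp only [PySem.Set.empty, List.not_mem_nil, false_or, PySem.Set.mem_ofList,
      List.mem_flatMap, decide_eq_true_eq, hadj]
  rw [hperm.length_eq]

-- ===== VERDICT (by name: the statement is the Claim_ definition above) =====
theorem count_between_corners_spec : Claim_equal_count_between_corners := by
  intro grid region _
  exact spec_main grid region
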